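-- pv_equiv track=rewrite | github.com/Mhmd-Hisham/Introduction-to-Python-Scripting | 4- Python Data Visualization/week3/isp_unify_template.py | reconcile_countries_by_name
-- ===== SOURCE A (Python) =====
-- def reconcile_countries_by_name(plot_countries, gdp_countries):
--     """
--     Inputs:
--       plot_countries - Dictionary whose keys are plot library country codes
--                        and values are the corresponding country name
--       gdp_countries  - Dictionary whose keys are country names used in GDP data
--
--     Output:
--       A tuple containing a dictionary and a set.  The dictionary maps
--       country codes from plot_countries to country names from
--       gdp_countries The set contains the country codes from
--       plot_countries that were not found in gdp_countries.
--     """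
--     mapping = {}
--     non_matching = set()
--
--     for country_code in plot_countries:
--         country = plot_countries[country_code]
--
--         if country in gdp_countries:
--             mapping[country_code] = country
--             continue
--
--         non_matching.add(country_code)
--
--     return mapping, non_matching
-- ===== SOURCE B (Python) =====
-- def reconcile_countries_by_name(plot_countries, gdp_countries):
--     """Sort-then-merge: the set of country names present in both inputs is computed
--     by a two-pointer merge of the two sorted name lists (no hashing into gdp_countries),
--     then the outputs are assembled from it."""
--     values = sorted(set(plot_countries.values()))
--     names = sorted(gdp_countries)
--     matched = set()
--     i = j = 0
--     while i < len(values) and j < len(names):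
--         if values[i] < names[j]:
--             i += 1
--         elif names[j] < values[i]:
--             j += 1
--         else:
--             matched.add(values[i])
--             i += 1
--             j += 1
--     mapping = {code: name for code, name in plot_countries.items() if name in matched}
--     non_matching = set(plot_countries) - set(mapping)
--     return mapping, non_matching
-- ===== Notes on version B (the rewrite author's own statement) =====
-- stated objective: alternative
-- what changed: B determines the set of names common to both inputs by sorting the two name collections and intersecting them with a two-pointer merge, instead of testing each plot value against the gdp dict during the traversal; the outputs are then assembled from that precomputed intersection (mapping by a comprehension, non_matching by key-set difference).
import Mathlib
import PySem

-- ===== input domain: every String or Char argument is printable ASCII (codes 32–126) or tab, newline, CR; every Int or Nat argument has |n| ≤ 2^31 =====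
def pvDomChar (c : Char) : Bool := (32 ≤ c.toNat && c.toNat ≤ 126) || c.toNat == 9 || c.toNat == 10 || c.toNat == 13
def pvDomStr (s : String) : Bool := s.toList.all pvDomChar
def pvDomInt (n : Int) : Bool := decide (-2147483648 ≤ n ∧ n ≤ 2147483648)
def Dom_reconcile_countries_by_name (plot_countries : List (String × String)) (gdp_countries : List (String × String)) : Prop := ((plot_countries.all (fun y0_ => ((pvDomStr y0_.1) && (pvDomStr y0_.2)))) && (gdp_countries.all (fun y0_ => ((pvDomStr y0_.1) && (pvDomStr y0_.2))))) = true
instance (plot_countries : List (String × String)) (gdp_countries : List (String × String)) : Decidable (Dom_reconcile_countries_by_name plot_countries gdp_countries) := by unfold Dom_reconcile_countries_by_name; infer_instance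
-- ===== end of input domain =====

-- B computes the set of names common to both inputs by a two-pointer merge of the two
-- SORTED name lists instead of testing each plot value against the gdp dict inside the
-- traversal, then assembles mapping/non_matching from that intersection (objective: alternative).

-- ===== PORT A =====
-- loop over the dict's items, maintaining BOTH the mapping dict and the non_matching set
def reconcile_countries_by_name (plot_countries : List (String × String)) (gdp_countries : List (String × String)) : (List (String × String)) × List String :=
  let r := plot_countries.foldl
    (fun (st : PySem.Dict String String × PySem.Set String) kv =>
      -- 'country in gdp_countries' = key membership in the gdp dict
      if gdp_countries.any (fun g => g.1 == kv.2) then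
        (st.1.insert kv.1 kv.2, st.2)
      else
        (st.1, st.2.add kv.1))
    (PySem.Dict.empty, PySem.Set.empty)
  (r.1.items, r.2)

-- ===== PORT B =====
-- the while loop of Source B: two-pointer merge over the two sorted name lists
def pvMergeLoop (values names : List String) (i j : Nat) (acc : PySem.Set String) : PySem.Set String :=
  if h : i < values.length ∧ j < names.length then
    if values[i] < names[j] then
      pvMergeLoop values names (i + 1) j acc
    else if names[j] < values[i] then
      pvMergeLoop values names i (j + 1) acc
    else
      pvMergeLoop values names (i + 1) (j + 1) (PySem.Set.add acc values[i])
  else acc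
termination_by (values.length - i) + (names.length - j)

-- sorted(set(values)) and sorted(gdp keys), merge, then comprehension + key-set difference
def reconcile_countries_by_name_alt (plot_countries : List (String × String)) (gdp_countries : List (String × String)) : (List (String × String)) × List String :=
  let values := PySem.List.sorted (PySem.Set.ofList (plot_countries.map Prod.snd)) (fun x => x) false
  let names := PySem.List.sorted (gdp_countries.map Prod.fst) (fun x => x) false
  let matched := pvMergeLoop values names 0 0 PySem.Set.empty
  let mapping := plot_countries.filter (fun kv => matched.contains kv.2)
  let non_matching := PySem.Set.diff (PySem.Set.ofList (plot_countries.map Prod.fst))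
                        (PySem.Set.ofList (mapping.map Prod.fst))
  (mapping, non_matching)

-- ===== PRECONDITION & SPEC =====
-- Pre_ is the representation invariant of the 'plot_countries' dict argument: its keys are
-- unique (every real Python dict satisfies it; no input of A is excluded).
def Pre_reconcile_countries_by_name (plot_countries : List (String × String)) (gdp_countries : List (String × String)) : Prop :=
  (plot_countries.map Prod.fst).Nodup

instance (plot_countries : List (String × String)) (gdp_countries : List (String × String)) : Decidable (Pre_reconcile_countries_by_name plot_countries gdp_countries) := by unfold Pre_reconcile_countries_by_name; infer_instance

def pvWitness_reconcile_countries_by_name : (List (String × String)) × (List (String × String)) :=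
  ([("us", "United States"), ("no", "Norway")], [("United States", "1")])

def Spec_reconcile_countries_by_name (plot_countries : List (String × String)) (gdp_countries : List (String × String)) (out : (List (String × String)) × List String) : Prop := out = reconcile_countries_by_name_alt plot_countries gdp_countries
instance (plot_countries : List (String × String)) (gdp_countries : List (String × String)) (out : (List (String × String)) × List String) : Decidable (Spec_reconcile_countries_by_name plot_countries gdp_countries out) := by unfold Spec_reconcile_countries_by_name; infer_instance

-- ===== CLAIM (what is proved, stated in full; the proofs are below) =====
def Claim_equal_reconcile_countries_by_name : Prop := ∀ (plot_countries : List (String × String)) (gdp_countries : List (String × String)), Dom_reconcile_countries_by_name plot_countries gdp_countries → Pre_reconcile_countries_by_name plot_countries gdp_countries → Spec_reconcile_countries_by_name plot_countries gdp_countries (reconcile_countries_by_name plot_countries gdp_countries)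

-- ===== LEMMAS AND PROOFS =====

-- the merge loop computes exactly the intersection of the two (sorted) suffixes
lemma pv_merge_mem (values names : List String)
    (hv : values.Pairwise (· ≤ ·)) (hn : names.Pairwise (· ≤ ·)) :
    ∀ (i j : Nat) (acc : PySem.Set String) (x : String),
      x ∈ pvMergeLoop values names i j acc ↔
        x ∈ acc ∨ (x ∈ values.drop i ∧ x ∈ names.drop j) := by
  intro i j acc
  fun_induction pvMergeLoop values names i j acc with
  | case1 i j acc h hlt ih =>
    intro x
    rw [ih x]
    have hdv : values.drop i = values[i] :: values.drop (i + 1) :=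
      List.drop_eq_getElem_cons h.1
    have hdn : names.drop j = names[j] :: names.drop (j + 1) :=
      List.drop_eq_getElem_cons h.2
    have hge : ∀ y ∈ names.drop (j + 1), names[j] ≤ y := by
      have hp : (names[j] :: names.drop (j + 1)).Pairwise (· ≤ ·) := hdn ▸ hn.drop (i := j)
      exact (List.pairwise_cons.mp hp).1
    have hkey : x ∈ values.drop (i + 1) ∧ x ∈ names.drop j ↔
        x ∈ values.drop i ∧ x ∈ names.drop j := by
      constructor
      · rintro ⟨h1, h2⟩
        exact ⟨by rw [hdv]; exact List.mem_cons_of_mem _ h1, h2⟩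
      · rintro ⟨h1, h2⟩
        rw [hdv] at h1
        rcases List.mem_cons.mp h1 with he | h1'
        · exfalso
          rw [hdn] at h2
          rcases List.mem_cons.mp h2 with he2 | h2'
          · exact lt_irrefl _ (he ▸ he2 ▸ hlt)
          · exact absurd (lt_of_lt_of_le hlt (hge x h2')) (he ▸ lt_irrefl x)
        · exact ⟨h1', h2⟩
    rw [hkey]
  | case2 i j acc h hlt1 hlt2 ih =>
    intro x
    rw [ih x]
    have hdv : values.drop i = values[i] :: values.drop (i + 1) :=
      List.drop_eq_getElem_cons h.1
    have hdn : names.drop j = names[j] :: names.drop (j + 1) :=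
      List.drop_eq_getElem_cons h.2
    have hge : ∀ y ∈ values.drop (i + 1), values[i] ≤ y := by
      have hp : (values[i] :: values.drop (i + 1)).Pairwise (· ≤ ·) := hdv ▸ hv.drop (i := i)
      exact (List.pairwise_cons.mp hp).1
    have hkey : x ∈ values.drop i ∧ x ∈ names.drop (j + 1) ↔
        x ∈ values.drop i ∧ x ∈ names.drop j := by
      constructor
      · rintro ⟨h1, h2⟩
        exact ⟨h1, by rw [hdn]; exact List.mem_cons_of_mem _ h2⟩
      · rintro ⟨h1, h2⟩
        rw [hdn] at h2
        rcases List.mem_cons.mp h2 with he | h2'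
        · exfalso
          rw [hdv] at h1
          rcases List.mem_cons.mp h1 with he2 | h1'
          · exact lt_irrefl _ (he ▸ he2 ▸ hlt2)
          · exact absurd (lt_of_lt_of_le hlt2 (hge x h1')) (he ▸ lt_irrefl x)
        · exact ⟨h1, h2'⟩
    rw [hkey]
  | case3 i j acc h hlt1 hlt2 ih =>
    intro x
    rw [ih x]
    have heq : values[i] = names[j] := le_antisymm (le_of_not_gt hlt2) (le_of_not_gt hlt1)
    have hdv : values.drop i = values[i] :: values.drop (i + 1) :=
      List.drop_eq_getElem_cons h.1
    have hdn : names.drop j = names[j] :: names.drop (j + 1) :=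
      List.drop_eq_getElem_cons h.2
    rw [PySem.Set.mem_add, hdv, hdn]
    simp only [List.mem_cons]
    constructor
    · rintro ((ha | ha) | ⟨h1, h2⟩)
      · exact Or.inl ha
      · exact Or.inr ⟨Or.inl ha, Or.inl (ha.trans heq)⟩
      · exact Or.inr ⟨Or.inr h1, Or.inr h2⟩
    · rintro (ha | ⟨h1 | h1, h2 | h2⟩)
      · exact Or.inl (Or.inl ha)
      · exact Or.inl (Or.inr h1)
      · exact Or.inl (Or.inr h1)
      · exact Or.inl (Or.inr (h2.trans heq.symm))
      · exact Or.inr ⟨h1, h2⟩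
  | case4 i j acc h =>
    intro x
    have hnil : values.drop i = [] ∨ names.drop j = [] := by
      rcases Nat.lt_or_ge i values.length with hi | hi
      · rcases Nat.lt_or_ge j names.length with hj | hj
        · exact absurd ⟨hi, hj⟩ h
        · exact Or.inr (List.drop_eq_nil_of_le hj)
      · exact Or.inl (List.drop_eq_nil_of_le hi)
    rcases hnil with he | he <;> simp [he]

-- the loop of A, with the accumulators generalized
lemma pv_loop_spec (p : String × String → Bool) :
    ∀ (l : List (String × String)) (d : PySem.Dict String String) (s : PySem.Set String),
      (∀ kv ∈ l, d.contains kv.1 = false) →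
      (l.map Prod.fst).Nodup →
      (∀ kv ∈ l, kv.1 ∉ s) →
      (l.foldl
        (fun (st : PySem.Dict String String × PySem.Set String) kv =>
          if p kv then (st.1.insert kv.1 kv.2, st.2) else (st.1, st.2.add kv.1))
        (d, s))
      = (PySem.Dict.mk (d.items ++ l.filter p),
         s ++ (l.filter (fun kv => !p kv)).map Prod.fst) := by
  intro l
  induction l with
  | nil => intro d s _ _ _; simp
  | cons kv t ih =>
    intro d s hfresh hnd hs
    have hkv : d.contains kv.1 = false := hfresh kv (by simp)
    have hkvt : kv.1 ∉ t.map Prod.fst := (List.nodup_cons.mp (by simpa using hnd)).1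
    have hndt : (t.map Prod.fst).Nodup := (List.nodup_cons.mp (by simpa using hnd)).2
    simp only [List.foldl_cons]
    by_cases hp : p kv = true
    · rw [if_pos hp]
      have hins : (d.insert kv.1 kv.2).items = d.items ++ [kv] := by
        exact PySem.Dict.items_insert_of_not_contains d kv.2 hkv
      rw [ih (d.insert kv.1 kv.2) s
        (by
          intro kv' h'
          have hne : kv'.1 ≠ kv.1 := fun he => hkvt (he ▸ List.mem_map_of_mem h')
          rw [PySem.Dict.contains_insert]
          simp [hne, hfresh kv' (List.mem_cons_of_mem _ h')])
        hndt
        (fun kv' h' => hs kv' (List.mem_cons_of_mem _ h'))]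
      have : d.insert kv.1 kv.2 = PySem.Dict.mk (d.items ++ [kv]) := by
        apply PySem.Dict.ext; simpa using hins
      rw [this]
      simp [hp]
    · rw [if_neg hp]
      have hadd : PySem.Set.add s kv.1 = s ++ [kv.1] :=
        PySem.Set.add_of_not_mem (hs kv (by simp))
      rw [ih d (PySem.Set.add s kv.1)
        (fun kv' h' => hfresh kv' (List.mem_cons_of_mem _ h'))
        hndt
        (by
          intro kv' h'
          have hne : kv'.1 ≠ kv.1 := fun he => hkvt (he ▸ List.mem_map_of_mem h')
          rw [hadd]
          simp [hne, hs kv' (List.mem_cons_of_mem _ h')])]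
      rw [hadd]
      simp [hp]

-- the set-difference expression of B equals the filtered key list A accumulates
lemma pv_diff_spec (p : String × String → Bool) (l : List (String × String))
    (hnd : (l.map Prod.fst).Nodup) :
    PySem.Set.diff (PySem.Set.ofList (l.map Prod.fst))
        (PySem.Set.ofList ((l.filter p).map Prod.fst))
      = (l.filter (fun kv => !p kv)).map Prod.fst := by
  rw [PySem.Set.ofList_eq_self_of_nodup _ hnd]
  have hmemkeys : ∀ kv ∈ l,
      ((PySem.Set.ofList ((l.filter p).map Prod.fst)).contains kv.1) = p kv := by
    intro kv hkv
    by_cases hp : p kv = true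
    · have : kv.1 ∈ (l.filter p).map Prod.fst :=
        List.mem_map_of_mem (List.mem_filter.mpr ⟨hkv, hp⟩)
      simp [hp, PySem.Set.mem_ofList, this]
    · have : kv.1 ∉ (l.filter p).map Prod.fst := by
        intro hmem
        rcases List.mem_map.mp hmem with ⟨kv', hkv', he⟩
        have hkv'l : kv' ∈ l := (List.mem_filter.mp hkv').1
        have := List.inj_on_of_nodup_map hnd hkv'l hkv he
        exact hp (this ▸ (List.mem_filter.mp hkv').2)
      simp [hp, PySem.Set.mem_ofList] at this ⊢
      exact this
  show (l.map Prod.fst).filter _ = _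
  rw [List.filter_map, List.filter_congr (fun kv hkv => by
    show (!(PySem.Set.ofList ((l.filter p).map Prod.fst)).contains kv.1) = !p kv
    rw [hmemkeys kv hkv])]

-- on the items of plot_countries B's merged-intersection membership test decides
-- exactly A's 'country in gdp_countries'
lemma pv_pred_eq (plot gdp : List (String × String)) :
    ∀ kv ∈ plot,
      ((pvMergeLoop
          (PySem.List.sorted (PySem.Set.ofList (plot.map Prod.snd)) (fun x => x) false)
          (PySem.List.sorted (gdp.map Prod.fst) (fun x => x) false)
          0 0 PySem.Set.empty).contains kv.2)
        = gdp.any (fun g => g.1 == kv.2) := by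
  intro kv hkv
  have hv : (PySem.List.sorted (PySem.Set.ofList (plot.map Prod.snd)) (fun x => x) false).Pairwise (· ≤ ·) :=
    PySem.List.sorted_pairwise _ _
  have hn : (PySem.List.sorted (gdp.map Prod.fst) (fun x => x) false).Pairwise (· ≤ ·) :=
    PySem.List.sorted_pairwise _ _
  have hmem := pv_merge_mem _ _ hv hn 0 0 PySem.Set.empty kv.2
  simp only [List.drop_zero] at hmem
  have hval : kv.2 ∈ PySem.List.sorted (PySem.Set.ofList (plot.map Prod.snd)) (fun x => x) false := by
    rw [PySem.List.mem_sorted, PySem.Set.mem_ofList]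
    exact List.mem_map_of_mem hkv
  rw [Bool.eq_iff_iff]
  rw [PySem.Set.contains_iff, hmem, List.any_eq_true]
  constructor
  · rintro (ha | ⟨_, hnm⟩)
    · simp [PySem.Set.empty] at ha
    · rw [PySem.List.mem_sorted] at hnm
      rcases List.mem_map.mp hnm with ⟨g, hgmem, hge⟩
      exact ⟨g, hgmem, by simp [hge]⟩
  · rintro ⟨g, hgmem, hge⟩
    refine Or.inr ⟨hval, ?_⟩
    rw [PySem.List.mem_sorted]
    exact List.mem_map.mpr ⟨g, hgmem, (eq_of_beq hge).symm ▸ rfl⟩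

-- ===== VERDICT (by name: the statement is the Claim_ definition above) =====
theorem reconcile_countries_by_name_spec : Claim_equal_reconcile_countries_by_name := by
  intro plot gdp _ hpre
  unfold Spec_reconcile_countries_by_name
  unfold reconcile_countries_by_name reconcile_countries_by_name_alt
  rw [pv_loop_spec _ plot PySem.Dict.empty PySem.Set.empty
    (fun kv _ => PySem.Dict.contains_empty kv.1) hpre (by simp [PySem.Set.empty])]
  dsimp only
  rw [List.filter_congr (pv_pred_eq plot gdp)]
  rw [pv_diff_spec _ plot hpre]
  simp [PySem.Dict.empty, PySem.Set.empty]
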